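-- pv_equiv track=rewrite | github.com/pypi-data/pypi-mirror-373 | packages/doris-mcp-server/doris_mcp_server-0.6.0.tar.gz/doris_mcp_server-0.6.0/doris_mcp_server/utils/monitoring_tools.py | _filter_p0_metrics
-- ===== SOURCE A (Python) =====
-- from typing import Any, Dict, List, Optional, Tuple
--
-- class P0MetricInfo:
--     """P0级监控项信息类"""
--
--     def __init__(self, name: str, meaning: str, description: str, unit: str = ""):
--         self.name = name
--         self.meaning = meaning
--         self.description = description
--         self.unit = unit
--
--     def to_dict(self) -> Dict[str, str]:
--         return {
--             "name": self.name,
--             "meaning": self.meaning,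
--             "description": self.description,
--             "unit": self.unit
--         }
--
-- def _filter_p0_metrics(metrics: Dict[str, Any], p0_metrics: Dict[str, P0MetricInfo]) -> Dict[str, Any]:
--     """Filter out P0 level monitoring metrics"""
--     filtered_metrics = {}
--
--     for metric_name, metric_value in metrics.items():
--         # Check if it's a P0 level metric
--         if metric_name in p0_metrics:
--             filtered_metrics[metric_name] = metric_value
--         else:
--             # Check if it's a variant of P0 metric (with labels)
--             for p0_name in p0_metrics.keys():
--                 if metric_name.startswith(p0_name):
--                     filtered_metrics[metric_name] = metric_value
--                     break
--
--     return filtered_metrics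
-- ===== SOURCE B (Python) =====
-- def _filter_p0_metrics(metrics, p0_metrics):
--     """Keep metrics whose name equals or starts with some P0 metric name."""
--     p0_names = set(p0_metrics)
--     return {
--         name: value
--         for name, value in metrics.items()
--         if any(name[:i] in p0_names for i in range(len(name) + 1))
--     }
-- ===== Notes on version B (the rewrite author's own statement) =====
-- stated objective: faster
-- what changed: Instead of scanning every P0 name per metric (membership test plus a startswith loop), B builds the set of P0 names once and keeps a metric iff any prefix name[:i] of its name is in that set.
import Mathlib
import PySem

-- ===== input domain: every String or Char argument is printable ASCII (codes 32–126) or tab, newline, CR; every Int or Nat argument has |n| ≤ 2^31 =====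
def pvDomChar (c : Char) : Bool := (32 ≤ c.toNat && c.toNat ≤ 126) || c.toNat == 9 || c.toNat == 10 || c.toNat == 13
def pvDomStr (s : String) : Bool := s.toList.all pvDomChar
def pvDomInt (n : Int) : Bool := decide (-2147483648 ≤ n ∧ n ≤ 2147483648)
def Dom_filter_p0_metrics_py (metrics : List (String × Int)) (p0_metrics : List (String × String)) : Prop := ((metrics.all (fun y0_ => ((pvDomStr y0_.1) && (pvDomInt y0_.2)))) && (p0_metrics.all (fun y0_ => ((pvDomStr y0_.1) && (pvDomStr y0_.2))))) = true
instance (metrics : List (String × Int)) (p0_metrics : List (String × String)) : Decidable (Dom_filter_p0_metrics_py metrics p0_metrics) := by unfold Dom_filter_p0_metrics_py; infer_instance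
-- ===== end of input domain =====

-- B replaces A's inner scan over all P0 names by a single set of P0 names probed with
-- every prefix of the metric name (objective: faster — O(M·L+P) instead of O(M·P·L)).

-- ===== PORT A =====
-- A: for each metric, keep it if its name is a key of p0_metrics, else scan all P0
-- names for one that the metric name starts with (break on first hit).
def filter_p0_metrics_py (metrics : List (String × Int)) (p0_metrics : List (String × String)) : List (String × Int) :=
  (metrics.foldl (fun filtered p =>
      if p0_metrics.any (fun q => q.1 == p.1) then
        filtered.insert p.1 p.2
      else if (p0_metrics.map (·.1)).any (fun p0_name => PySem.Str.startswith p.1 p0_name) then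
        filtered.insert p.1 p.2
      else filtered)
    PySem.Dict.empty).items

-- ===== PORT B =====
-- B: build the set of P0 names once, then keep a metric iff some prefix name[:i] is in it.
def filter_p0_metrics_py_alt (metrics : List (String × Int)) (p0_metrics : List (String × String)) : List (String × Int) :=
  let p0_names : PySem.Set String := PySem.Set.ofList (p0_metrics.map (·.1))
  (metrics.foldl (fun acc p =>
      if (PySem.List.pyRange 0 (PySem.Str.len p.1 + 1) 1).any
           (fun i => p0_names.contains (PySem.Str.slice p.1 none (some i))) then
        acc.insert p.1 p.2
      else acc)
    PySem.Dict.empty).items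

-- ===== PRECONDITION & SPEC =====
def Spec_filter_p0_metrics_py (metrics : List (String × Int)) (p0_metrics : List (String × String)) (out : List (String × Int)) : Prop := out = filter_p0_metrics_py_alt metrics p0_metrics
instance (metrics : List (String × Int)) (p0_metrics : List (String × String)) (out : List (String × Int)) : Decidable (Spec_filter_p0_metrics_py metrics p0_metrics out) := by unfold Spec_filter_p0_metrics_py; infer_instance

-- ===== CLAIM (what is proved, stated in full; the proofs are below) =====
def Claim_equal_filter_p0_metrics_py : Prop := ∀ (metrics : List (String × Int)) (p0_metrics : List (String × String)), Dom_filter_p0_metrics_py metrics p0_metrics → Spec_filter_p0_metrics_py metrics p0_metrics (filter_p0_metrics_py metrics p0_metrics)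

-- ===== LEMMAS AND PROOFS =====

-- Both match conditions say "some P0 name is a prefix of the metric name".
theorem match_eq (keys : List String) (name : String) :
    ((keys.any (fun q => q == name)) || keys.any (fun p0 => PySem.Str.startswith name p0))
  = (PySem.List.pyRange 0 (PySem.Str.len name + 1) 1).any
      (fun i => (PySem.Set.ofList keys).contains (PySem.Str.slice name none (some i))) := by
  rw [Bool.eq_iff_iff]
  simp only [Bool.or_eq_true, List.any_eq_true, beq_iff_eq, PySem.Set.contains_iff,
    PySem.Set.mem_ofList, PySem.List.mem_pyRange_one, PySem.Str.startswith_eq,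
    PySem.Chars.startswith_iff, PySem.Str.len_eq]
  constructor
  · intro h
    obtain ⟨p0, hp0, hpre⟩ : ∃ p0 ∈ keys, p0.toList <+: name.toList := by
      rcases h with ⟨p0, hp0, heq⟩ | ⟨p0, hp0, hpre⟩
      · exact ⟨p0, hp0, by rw [heq]⟩
      · exact ⟨p0, hp0, hpre⟩
    refine ⟨(p0.toList.length : Int), ⟨Int.natCast_nonneg _, by have := hpre.length_le; omega⟩, ?_⟩
    have ht : (PySem.Str.slice name none (some (p0.toList.length : Int))).toList = p0.toList := by
      simp only [PySem.Str.slice, PySem.Chars.slice_eq_listSlice, PySem.List.slice_to_natCast,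
        String.toList_ofList]
      exact (List.prefix_iff_eq_take.mp hpre).symm
    rwa [String.toList_inj.mp ht]
  · rintro ⟨i, ⟨h0, _⟩, hmem⟩
    refine Or.inr ⟨_, hmem, ?_⟩
    have ht : (PySem.Str.slice name none (some i)).toList = name.toList.take i.toNat := by
      simp only [PySem.Str.slice, PySem.Chars.slice_eq_listSlice, String.toList_ofList]
      exact PySem.List.slice_to _ h0
    rw [ht]
    exact List.take_prefix _ _

-- ===== VERDICT (by name: the statement is the Claim_ definition above) =====
theorem filter_p0_metrics_py_spec : Claim_equal_filter_p0_metrics_py := by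
  intro metrics ps _dom
  unfold Spec_filter_p0_metrics_py
  simp only [filter_p0_metrics_py, filter_p0_metrics_py_alt]
  congr 1
  congr 1
  funext d p
  rw [← match_eq (ps.map (·.1)) p.1]
  have h1 : (ps.map (·.1)).any (fun q => q == p.1) = ps.any (fun q => q.1 == p.1) := by
    simp [List.any_map, Function.comp_def]
  rw [h1]
  by_cases hA : ps.any (fun q => q.1 == p.1) = true
  · simp [hA]
  · simp only [Bool.not_eq_true] at hA
    rw [hA, Bool.false_or]
    simp
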